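-- pv_equiv track=rewrite | github.com/datboi6942/family_boggle | backend/family_boggle/challenges.py | check_progress
-- ===== SOURCE A (Python) =====
-- from typing import Dict, List, Optional, Tuple
--
-- def check_progress(found_words: List[str], score: int) -> int:
--     count = 0
--     for word in found_words:
--         w = word.upper()
--         for i in range(len(w) - 1):
--             if w[i] == w[i + 1]:
--                 count += 1
--                 break
--     return count
-- ===== SOURCE B (Python) =====
-- def check_progress(found_words, score):
--     def has_double(word):
--         w = word.upper()
--         return any(ch + ch in w for ch in set(w))
--     return sum(1 for word in found_words if has_double(word))
-- ===== Notes on version B (the rewrite author's own statement) =====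
-- stated objective: alternative
-- what changed: Instead of scanning adjacent index pairs with an early break, B detects a repeated adjacent letter by substring search: for each distinct character ch of the uppercased word it asks whether the doubled string ch+ch occurs in the word, and counts the qualifying words with a sum over a filter.
import Mathlib
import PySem

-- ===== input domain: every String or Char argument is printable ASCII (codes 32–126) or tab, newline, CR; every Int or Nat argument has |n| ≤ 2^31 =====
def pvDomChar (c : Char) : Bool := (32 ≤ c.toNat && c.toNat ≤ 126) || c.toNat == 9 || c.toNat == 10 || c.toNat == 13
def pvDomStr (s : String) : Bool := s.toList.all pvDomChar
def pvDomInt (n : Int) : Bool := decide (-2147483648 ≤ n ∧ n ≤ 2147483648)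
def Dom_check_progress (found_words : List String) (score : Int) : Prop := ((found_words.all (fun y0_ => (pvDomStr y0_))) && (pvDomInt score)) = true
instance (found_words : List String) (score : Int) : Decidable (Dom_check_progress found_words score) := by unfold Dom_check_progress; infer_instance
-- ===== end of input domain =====

-- B detects a repeated adjacent letter by searching the word for the doubled substring ch+ch of each distinct character, instead of A's adjacent-index scan with break; same result, different mechanism.

-- ===== PORT A =====
-- inner loop 'for i in range(len(w)-1): if w[i] == w[i+1]: count += 1; break'
-- returned as the Bool 'was count incremented'; the loop's indices i, i+1 are always
-- in range, so pyGetD's default is never used (exact at every reached index).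
def loopA (w : List Char) : List Int → Bool
  | [] => false
  | i :: rest =>
      if PySem.List.pyGetD w i ' ' == PySem.List.pyGetD w (i + 1) ' ' then true
      else loopA w rest

def check_progress (found_words : List String) (score : Int) : Int :=
  found_words.foldl
    (fun count word =>
      let w := (PySem.Str.upper word).toList
      if loopA w (PySem.List.pyRange 0 ((w.length : Int) - 1) 1) then count + 1 else count)
    0

-- ===== PORT B =====
-- any(ch + ch in w for ch in set(w)) — order over the set is immaterial (any)
def hasDoubleB (w : List Char) : Bool :=
  (PySem.Set.ofList w).any (fun ch => PySem.Chars.isIn [ch, ch] w)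

-- sum(1 for word in found_words if has_double(word))
def check_progress_alt (found_words : List String) (score : Int) : Int :=
  ((found_words.filter (fun word => hasDoubleB (PySem.Str.upper word).toList)).length : Int)

-- ===== PRECONDITION & SPEC =====
def Spec_check_progress (found_words : List String) (score : Int) (out : Int) : Prop := out = check_progress_alt found_words score
instance (found_words : List String) (score : Int) (out : Int) : Decidable (Spec_check_progress found_words score out) := by unfold Spec_check_progress; infer_instance

-- ===== CLAIM (what is proved, stated in full; the proofs are below) =====
def Claim_equal_check_progress : Prop := ∀ (found_words : List String) (score : Int), Dom_check_progress found_words score → Spec_check_progress found_words score (check_progress found_words score)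

-- ===== LEMMAS AND PROOFS =====

-- A's index loop from position j is true iff the suffix from j contains two equal adjacent characters.
lemma loopA_iff_aux (w : List Char) :
    ∀ n j : ℕ, w.length - j ≤ n →
      (loopA w (PySem.List.pyRange (j : Int) ((w.length : Int) - 1) 1) = true ↔
        ∃ s t c, w.drop j = s ++ c :: c :: t) := by
  intro n
  induction n with
  | zero =>
      intro j hj
      have hjl : w.length ≤ j := by omega
      rw [PySem.List.pyRange_one_eq_nil (by push_cast; omega)]
      simp only [loopA, List.drop_eq_nil_of_le hjl]
      constructor
      · intro h; exact absurd h (by simp)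
      · rintro ⟨s, t, c, h⟩
        exact absurd h.symm (by simp)
  | succ n ih =>
      intro j hj
      by_cases h : j + 1 < w.length
      · rw [PySem.List.pyRange_one_cons (by push_cast; omega)]
        have h1 : (j : Int) + 1 = ((j + 1 : ℕ) : Int) := by push_cast; ring
        rw [loopA, h1]
        simp only [PySem.List.pyGetD_natCast]
        rw [List.getD_eq_getElem _ _ (by omega), List.getD_eq_getElem _ _ (by omega)]
        have hdj : w.drop j = w[j] :: w[j+1] :: w.drop (j + 2) := by
          rw [List.drop_eq_getElem_cons (by omega : j < w.length)]
          congr 1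
          rw [List.drop_eq_getElem_cons (by omega : j + 1 < w.length)]
        by_cases heq : w[j] = w[j + 1]
        · simp only [heq, beq_self_eq_true, if_true]
          constructor
          · intro _
            exact ⟨[], w.drop (j + 2), w[j+1], by rw [hdj, heq]; rfl⟩
          · intro _; trivial
        · rw [if_neg (by simpa using heq)]
          rw [ih (j + 1) (by omega)]
          have hd1 : w.drop (j + 1) = w[j+1] :: w.drop (j + 2) :=
            List.drop_eq_getElem_cons (by omega : j + 1 < w.length)
          constructor
          · rintro ⟨s, t, c, hst⟩
            exact ⟨w[j] :: s, t, c, by rw [hdj, ← hd1, hst]; rfl⟩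
          · rintro ⟨s, t, c, hst⟩
            rw [hdj] at hst
            cases s with
            | nil =>
                simp only [List.nil_append, List.cons.injEq] at hst
                exact absurd (hst.1.trans hst.2.1.symm) heq
            | cons x s' =>
                simp only [List.cons_append, List.cons.injEq] at hst
                exact ⟨s', t, c, by rw [hd1, hst.2]⟩
      · rw [PySem.List.pyRange_one_eq_nil (by push_cast; omega)]
        simp only [loopA]
        constructor
        · intro hfalse; exact absurd hfalse (by simp)
        · rintro ⟨s, t, c, hst⟩
          have : (w.drop j).length ≤ 1 := by
            simp only [List.length_drop]; omega
          rw [hst] at this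
          simp at this; omega

-- B's set-of-doubled-substrings test is true iff the word has two equal adjacent characters.
lemma hasDoubleB_iff (w : List Char) :
    hasDoubleB w = true ↔ ∃ s t c, w = s ++ c :: c :: t := by
  unfold hasDoubleB
  rw [List.any_eq_true]
  constructor
  · rintro ⟨ch, _, hin⟩
    obtain ⟨s, t, hst⟩ := (PySem.Chars.isIn_iff_infix _ _).mp hin
    exact ⟨s, t, ch, by simpa using hst.symm⟩
  · rintro ⟨s, t, c, hst⟩
    refine ⟨c, ?_, ?_⟩
    · rw [PySem.Set.mem_ofList, hst]
      simp
    · rw [PySem.Chars.isIn_iff_infix]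
      exact ⟨s, t, by simpa using hst.symm⟩

lemma loopA_eq_hasDoubleB (w : List Char) :
    loopA w (PySem.List.pyRange 0 ((w.length : Int) - 1) 1) = hasDoubleB w := by
  have h := loopA_iff_aux w w.length 0 (by omega)
  simp only [Nat.cast_zero, List.drop_zero] at h
  rw [Bool.eq_iff_iff, h, hasDoubleB_iff]

lemma fold_eq_filter_length (ws : List String) :
    ∀ c : Int,
      ws.foldl
        (fun count word =>
          let w := (PySem.Str.upper word).toList
          if loopA w (PySem.List.pyRange 0 ((w.length : Int) - 1) 1) then count + 1 else count)
        c
      = c + ((ws.filter (fun word => hasDoubleB (PySem.Str.upper word).toList)).length : Int) := by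
  induction ws with
  | nil => intro c; simp
  | cons word rest ih =>
      intro c
      rw [List.foldl_cons, ih]
      simp only [List.filter_cons, loopA_eq_hasDoubleB, PySem.Str.toList_upper]
      split_ifs with h
      · simp only [List.length_cons]; push_cast; ring
      · rfl

-- ===== VERDICT (by name: the statement is the Claim_ definition above) =====
theorem check_progress_spec : Claim_equal_check_progress := by
  intro found_words score _
  unfold Spec_check_progress check_progress check_progress_alt
  simpa using fold_eq_filter_length found_words 0
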